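-- pv_equiv track=rewrite | github.com/get-hunter/hero365-app | backend/app/application/services/cloudflare_pages_deployment_service.py | _parse_deploy_url_from_output
-- ===== SOURCE A (Python) =====
-- def _parse_deploy_url_from_output(output: str, project_name: str) -> str:
--     """Parse deployment URL from Wrangler output."""
--     lines = output.split("\n")
--
--     # Look for URL in output
--     for line in lines:
--         if "https://" in line and "pages.dev" in line:
--             # Extract URL
--             parts = line.split()
--             for part in parts:
--                 if part.startswith("https://") and "pages.dev" in part:
--                     return part.strip()
--
--     # Fallback to constructed URL
--     return f"https://{project_name}.pages.dev"
-- ===== SOURCE B (Python) =====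
-- def _parse_deploy_url_from_output(output: str, project_name: str) -> str:
--     """Parse deployment URL from Wrangler output: one flat pass over
--     whitespace-separated tokens of the whole output (no per-line scan)."""
--     return next(
--         (tok for tok in output.split()
--          if tok.startswith("https://") and "pages.dev" in tok),
--         f"https://{project_name}.pages.dev",
--     )
-- ===== Notes on version B (the rewrite author's own statement) =====
-- stated objective: simpler
-- what changed: Replaced the nested scan (split into lines, filter lines by two substring tests, then scan each line's whitespace tokens and strip the hit) by a single flat pass over output.split() returning the first token that starts with 'https://' and contains 'pages.dev', with the same f-string fallback.
import Mathlib
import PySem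

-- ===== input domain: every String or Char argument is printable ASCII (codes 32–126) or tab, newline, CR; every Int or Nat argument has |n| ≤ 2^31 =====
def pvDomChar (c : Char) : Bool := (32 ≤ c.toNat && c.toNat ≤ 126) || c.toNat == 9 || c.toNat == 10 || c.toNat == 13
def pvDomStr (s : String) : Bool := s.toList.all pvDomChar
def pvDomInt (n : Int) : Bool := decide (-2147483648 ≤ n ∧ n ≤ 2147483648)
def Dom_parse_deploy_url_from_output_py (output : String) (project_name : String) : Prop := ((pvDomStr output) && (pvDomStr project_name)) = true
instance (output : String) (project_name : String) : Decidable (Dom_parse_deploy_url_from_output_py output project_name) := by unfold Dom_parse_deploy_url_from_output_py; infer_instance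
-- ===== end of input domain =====

-- B replaces A's nested line-filter-then-token scan by one flat pass over the whitespace tokens
-- of the whole output (objective: simpler; same result proved for all inputs in Dom).

-- ===== PORT A =====
-- inner loop: 'for part in parts: if part.startswith("https://") and "pages.dev" in part: return part.strip()'
def pvPartsLoopA : List String → Option String
  | [] => none
  | part :: rest =>
    if PySem.Str.startswith part "https://" && PySem.Str.isIn "pages.dev" part then
      some (PySem.Str.strip part)
    else pvPartsLoopA rest

-- outer loop: 'for line in lines: if "https://" in line and "pages.dev" in line: …'
def pvLinesLoopA : List String → Option String
  | [] => none
  | line :: rest =>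
    if PySem.Str.isIn "https://" line && PySem.Str.isIn "pages.dev" line then
      match pvPartsLoopA (PySem.Str.split₀ line) with
      | some r => some r
      | none => pvLinesLoopA rest
    else pvLinesLoopA rest

def parse_deploy_url_from_output_py (output : String) (project_name : String) : String :=
  -- lines = output.split("\n")  (sep is the non-empty literal "\n", so split? never returns none)
  let lines := (PySem.Str.split? output "\n").getD []
  match pvLinesLoopA lines with
  | some r => r
  | none => "https://" ++ project_name ++ ".pages.dev"

-- ===== PORT B =====
-- next((tok for tok in output.split() if tok.startswith("https://") and "pages.dev" in tok), fallback)
def parse_deploy_url_from_output_py_alt (output : String) (project_name : String) : String :=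
  match (PySem.Str.split₀ output).find?
      (fun tok => PySem.Str.startswith tok "https://" && PySem.Str.isIn "pages.dev" tok) with
  | some tok => tok
  | none => "https://" ++ project_name ++ ".pages.dev"

-- ===== PRECONDITION & SPEC =====
def Spec_parse_deploy_url_from_output_py (output : String) (project_name : String) (out : String) : Prop := out = parse_deploy_url_from_output_py_alt output project_name
instance (output : String) (project_name : String) (out : String) : Decidable (Spec_parse_deploy_url_from_output_py output project_name out) := by unfold Spec_parse_deploy_url_from_output_py; infer_instance

-- ===== CLAIM (what is proved, stated in full; the proofs are below) =====
def Claim_equal_parse_deploy_url_from_output_py : Prop := ∀ (output : String) (project_name : String), Dom_parse_deploy_url_from_output_py output project_name → Spec_parse_deploy_url_from_output_py output project_name (parse_deploy_url_from_output_py output project_name)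

-- ===== LEMMAS AND PROOFS =====

-- the token test both programs use
def pvTokOK (t : String) : Bool :=
  PySem.Str.startswith t "https://" && PySem.Str.isIn "pages.dev" t

-- clean recursions for whitespace split (accumulator = token built so far, in order)
def pvSplitW : List Char → List Char → List (List Char)
  | cur, [] => if cur = [] then [] else [cur]
  | cur, c :: s =>
    if PySem.Chars.isspace c then
      if cur = [] then pvSplitW [] s else cur :: pvSplitW [] s
    else pvSplitW (cur ++ [c]) s

-- clean recursion for split on the single character '\n'
def pvSplitNl : List Char → List Char → List (List Char)
  | cur, [] => [cur]
  | cur, c :: s => if c = '\n' then cur :: pvSplitNl [] s else pvSplitNl (cur ++ [c]) s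

theorem pvSplitW_go (s : List Char) : ∀ cur acc,
    PySem.Chars.split₀.go s cur acc = acc.reverse ++ pvSplitW cur.reverse s := by
  induction s with
  | nil =>
    intro cur acc
    by_cases h : cur = [] <;>
      simp [PySem.Chars.split₀.go, pvSplitW, h, List.isEmpty_iff]
  | cons c s ih =>
    intro cur acc
    by_cases hs : PySem.Chars.isspace c
    · by_cases h : cur = [] <;>
        simp [PySem.Chars.split₀.go, pvSplitW, hs, h, ih, List.isEmpty_iff]
    · simp [PySem.Chars.split₀.go, pvSplitW, hs, ih]

theorem pvSplit₀_eq (s : List Char) : PySem.Chars.split₀ s = pvSplitW [] s := by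
  simpa using pvSplitW_go s [] []

theorem pvSplitNl_go (fuel : Nat) : ∀ l cur acc, l.length ≤ fuel →
    PySem.Chars.splitOn.go ['\n'] fuel l cur acc = acc.reverse ++ pvSplitNl cur.reverse l := by
  induction fuel with
  | zero =>
    intro l cur acc h
    have : l = [] := by cases l <;> simp_all
    subst this
    simp [PySem.Chars.splitOn.go, pvSplitNl]
  | succ fuel ih =>
    intro l cur acc h
    cases l with
    | nil => simp [PySem.Chars.splitOn.go, pvSplitNl]
    | cons c rest =>
      by_cases hc : c = '\n'
      · subst hc
        have hp : List.isPrefixOf ['\n'] ('\n' :: rest) = true := by simp [List.isPrefixOf]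
        simp only [PySem.Chars.splitOn.go, hp, if_pos, List.length_cons, List.drop_succ_cons,
          List.length_nil, List.drop_zero]
        rw [ih rest [] (cur.reverse :: acc) (by simp at h; omega)]
        simp [pvSplitNl]
      · have hp : List.isPrefixOf ['\n'] (c :: rest) = false := by
          simp [List.isPrefixOf]; intro h'; exact absurd h'.symm hc
        simp only [PySem.Chars.splitOn.go, hp, Bool.false_eq_true, if_neg, not_false_iff]
        rw [ih rest (c :: cur) acc (by simp at h; omega)]
        simp [pvSplitNl, hc]

theorem pvSplitOn_eq (s : List Char) : PySem.Chars.splitOn s ['\n'] = pvSplitNl [] s := by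
  simpa using pvSplitNl_go (s.length + 1) s [] [] (by omega)

-- splitting at a whitespace character splits the token stream
theorem pvSplitW_append (a : List Char) (c : Char) (hc : PySem.Chars.isspace c = true) :
    ∀ cur b, pvSplitW cur (a ++ c :: b) = pvSplitW cur a ++ pvSplitW [] b := by
  induction a with
  | nil =>
    intro cur b
    by_cases h : cur = [] <;> simp [pvSplitW, hc, h]
  | cons d a ih =>
    intro cur b
    by_cases hd : PySem.Chars.isspace d
    · by_cases h : cur = [] <;> simp [pvSplitW, hd, h, ih]
    · simp [pvSplitW, hd, ih]

-- whitespace tokens of the whole string = concatenation over '\n'-lines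
theorem pvSplitNl_flat (s : List Char) : ∀ cur,
    (pvSplitNl cur s).flatMap (pvSplitW []) = pvSplitW [] (cur ++ s) := by
  induction s with
  | nil => intro cur; simp [pvSplitNl]
  | cons c s ih =>
    intro cur
    by_cases hc : c = '\n'
    · subst hc
      simp only [pvSplitNl, if_true, List.flatMap_cons]
      rw [pvSplitW_append cur '\n' (by decide) [] s, ih []]
      simp
    · simpa [pvSplitNl, hc] using ih (cur ++ [c])

-- every token is an infix of the split string (with its pending prefix)
theorem pvSplitW_infix (s : List Char) : ∀ cur t, t ∈ pvSplitW cur s → t <:+: cur ++ s := by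
  induction s with
  | nil =>
    intro cur t ht
    by_cases h : cur = [] <;> simp [pvSplitW, h] at ht
    simp [ht]
  | cons c s ih =>
    intro cur t ht
    have hsub : s <:+: cur ++ c :: s := ((s.suffix_cons c).isInfix).trans (List.infix_append_right (l₁ := cur))
    by_cases hs : PySem.Chars.isspace c
    · by_cases h : cur = [] <;> simp [pvSplitW, hs, h] at ht
      · exact (ih [] t (by simpa using ht)).trans hsub
      · rcases ht with ht | ht
        · subst ht; exact (List.prefix_append t (c :: s)).isInfix
        · exact (ih [] t (by simpa using ht)).trans hsub
    · have := ih (cur ++ [c]) t (by simpa [pvSplitW, hs] using ht)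
      simpa using this

-- tokens contain no whitespace characters
theorem pvSplitW_nospace (s : List Char) : ∀ cur t, (∀ c ∈ cur, PySem.Chars.isspace c = false) →
    t ∈ pvSplitW cur s → ∀ c ∈ t, PySem.Chars.isspace c = false := by
  induction s with
  | nil =>
    intro cur t hcur ht
    by_cases h : cur = [] <;> simp [pvSplitW, h] at ht
    subst ht; exact hcur
  | cons c s ih =>
    intro cur t hcur ht
    by_cases hs : PySem.Chars.isspace c
    · by_cases h : cur = [] <;> simp [pvSplitW, hs, h] at ht
      · exact ih [] t (by simp) ht
      · rcases ht with ht | ht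
        · subst ht; exact hcur
        · exact ih [] t (by simp) ht
    · refine ih (cur ++ [c]) t ?_ (by simpa [pvSplitW, hs] using ht)
      intro d hd
      rcases List.mem_append.mp hd with hd | hd
      · exact hcur d hd
      · simp at hd; subst hd; simpa using hs

theorem pvTokOK_def : pvTokOK = fun tok => PySem.Str.startswith tok "https://" && PySem.Str.isIn "pages.dev" tok := rfl

-- A's inner loop is find-first + strip
theorem pvPartsLoopA_eq (parts : List String) :
    pvPartsLoopA parts = (parts.find? pvTokOK).map PySem.Str.strip := by
  induction parts with
  | nil => simp [pvPartsLoopA]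
  | cons p rest ih =>
    unfold pvPartsLoopA
    rw [show (PySem.Str.startswith p "https://" && PySem.Str.isIn "pages.dev" p) = pvTokOK p from rfl]
    cases hp : pvTokOK p <;> simp [hp, ih]

-- a whitespace token of a string is unchanged by strip
theorem pvStrip_token {l t : String} (ht : t ∈ PySem.Str.split₀ l) : PySem.Str.strip t = t := by
  obtain ⟨tc, htc, rfl⟩ : ∃ tc, tc ∈ PySem.Chars.split₀ l.toList ∧ String.ofList tc = t := by
    simpa [PySem.Str.split₀] using ht
  have hn : ∀ c ∈ tc, PySem.Chars.isspace c = false :=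
    pvSplitW_nospace l.toList [] tc (by simp) (by rwa [pvSplit₀_eq] at htc)
  have h1 : PySem.Chars.lstrip tc = tc := by
    rw [PySem.Chars.lstrip, List.dropWhile_eq_self_iff]
    intro hl
    exact fun hc => absurd hc (by simp [hn tc[0] (List.getElem_mem hl)])
  have h2 : ∀ u : List Char, (∀ c ∈ u, PySem.Chars.isspace c = false) →
      PySem.Chars.rstrip u = u := by
    intro u hu
    rw [PySem.Chars.rstrip, List.dropWhile_eq_self_iff.mpr, List.reverse_reverse]
    intro hl hc
    exact absurd hc (by rw [hu u.reverse[0] (List.mem_reverse.mp (List.getElem_mem hl))]; simp)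
  simp only [PySem.Str.strip, String.toList_ofList, PySem.Chars.strip, h1, h2 tc hn]

-- a line A's filter rejects has no matching token
theorem pvLineFilter {l : String}
    (h : ¬(PySem.Str.isIn "https://" l && PySem.Str.isIn "pages.dev" l) = true) :
    (PySem.Str.split₀ l).find? pvTokOK = none := by
  rw [List.find?_eq_none]
  intro t ht hp
  obtain ⟨tc, htc, rfl⟩ : ∃ tc, tc ∈ PySem.Chars.split₀ l.toList ∧ String.ofList tc = t := by
    simpa [PySem.Str.split₀] using ht
  have hinf : tc <:+: l.toList := by
    simpa using pvSplitW_infix l.toList [] tc (by rwa [pvSplit₀_eq] at htc)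
  rw [pvTokOK] at hp
  obtain ⟨hpre, hin⟩ := Bool.and_eq_true_iff.mp hp
  apply h
  rw [Bool.and_eq_true_iff]
  constructor
  · rw [PySem.Str.isIn_iff_infix]
    exact ((List.IsPrefix.isInfix (by
      simp only [PySem.Str.startswith, PySem.Chars.startswith, String.toList_ofList,
        ← List.isPrefixOf_iff_prefix] at hpre ⊢
      exact hpre)).trans hinf)
  · rw [PySem.Str.isIn_iff_infix]
    exact ((PySem.Chars.isIn_iff_infix _ _).mp
      (by simp only [PySem.Str.isIn, String.toList_ofList] at hin; exact hin)).trans hinf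

-- A's outer loop is find-first over the concatenated per-line tokens
theorem pvLinesLoopA_eq (lines : List String) :
    pvLinesLoopA lines = ((lines.flatMap PySem.Str.split₀).find? pvTokOK).map PySem.Str.strip := by
  induction lines with
  | nil => simp [pvLinesLoopA]
  | cons line rest ih =>
    unfold pvLinesLoopA
    rw [List.flatMap_cons, List.find?_append]
    by_cases hf : (PySem.Str.isIn "https://" line && PySem.Str.isIn "pages.dev" line) = true
    · rw [if_pos hf, pvPartsLoopA_eq]
      cases hfind : (PySem.Str.split₀ line).find? pvTokOK <;> simp [ih]
    · rw [if_neg hf, pvLineFilter hf]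
      simp [ih]

-- the whitespace tokens of the whole output are the per-'\n'-line tokens, concatenated
theorem pvFlat (output : String) :
    ((PySem.Str.split? output "\n").getD []).flatMap PySem.Str.split₀ = PySem.Str.split₀ output := by
  have h1 : PySem.Str.split? output "\n"
      = some (List.map String.ofList (PySem.Chars.splitOn output.toList ['\n'])) := by
    rw [PySem.Str.split?, show ("\n" : String).toList = ['\n'] from rfl, PySem.Chars.split?]
    simp
  rw [h1, Option.getD_some, List.flatMap_map]
  have h2 : ∀ cs : List Char,
      PySem.Str.split₀ (String.ofList cs) = List.map String.ofList (pvSplitW [] cs) := by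
    intro cs
    rw [PySem.Str.split₀, String.toList_ofList, pvSplit₀_eq]
  rw [PySem.Str.split₀, pvSplit₀_eq, pvSplitOn_eq]
  calc (pvSplitNl [] output.toList).flatMap (fun cs => PySem.Str.split₀ (String.ofList cs))
      = (pvSplitNl [] output.toList).flatMap (fun cs => List.map String.ofList (pvSplitW [] cs)) := by
        simp only [h2]
    _ = List.map String.ofList ((pvSplitNl [] output.toList).flatMap (pvSplitW [])) := by
        rw [List.map_flatMap]
    _ = List.map String.ofList (pvSplitW [] output.toList) := by
        rw [show (pvSplitNl [] output.toList).flatMap (pvSplitW [])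
            = pvSplitW [] ([] ++ output.toList) from pvSplitNl_flat output.toList []]
        rfl

-- ===== VERDICT (by name: the statement is the Claim_ definition above) =====
theorem parse_deploy_url_from_output_py_spec : Claim_equal_parse_deploy_url_from_output_py := by
  intro output project_name _
  unfold Spec_parse_deploy_url_from_output_py
  unfold parse_deploy_url_from_output_py parse_deploy_url_from_output_py_alt
  rw [← pvTokOK_def]
  simp only []
  rw [pvLinesLoopA_eq, pvFlat]
  cases hf : (PySem.Str.split₀ output).find? pvTokOK with
  | none => simp
  | some t =>
    simp only [Option.map_some]
    exact pvStrip_token (List.mem_of_find?_eq_some hf)
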